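-- pv_equiv track=rewrite | github.com/stevenqing/UI-S1 | UI-S1/verl/models/moe/state_representation.py | _build_control_fingerprint
-- ===== SOURCE A (Python) =====
-- CONTROL_TYPES = (
--     "DataItem", "Button", "TabItem", "MenuItem", "Edit", "ListItem",
--     "ScrollBar", "ComboBox", "Hyperlink", "CheckBox", "TreeItem",
--     "Document", "RadioButton", "Spinner", "Image", "Text", "Slider",
-- )
--
-- CONTROL_TYPE_TO_IDX = {t: i for i, t in enumerate(CONTROL_TYPES)}
--
-- COUNT_BUCKETS = (0, 5, 15, 50, 150, 500)
--
-- def _bucket_count(count: int) -> int: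
--     """Map a count to a bucket index for coarser state hashing."""
--     for i, threshold in enumerate(COUNT_BUCKETS):
--         if count <= threshold:
--             return i
--     return len(COUNT_BUCKETS)
--
-- def _build_control_fingerprint(type_counts: dict[str, int]) -> str:
--     """Build a bucketed control-type distribution string.
--
--     Groups control counts into buckets to avoid over-splitting states
--     due to minor count variations (e.g., 359 vs 360 DataItems).
--     """
--     parts = []
--     for ctype in CONTROL_TYPES:
--         cnt = type_counts.get(ctype, 0)
--         bucket = _bucket_count(cnt)
--         if bucket > 0:  # skip zero-count types
--             parts.append(f"{ctype}:{bucket}")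
--     # Aggregate remaining types
--     other_count = sum(
--         cnt for t, cnt in type_counts.items() if t not in CONTROL_TYPE_TO_IDX
--     )
--     if other_count > 0:
--         parts.append(f"Other:{_bucket_count(other_count)}")
--     return ",".join(sorted(parts))
-- ===== SOURCE B (Python) =====
-- CONTROL_TYPES = (
--     "DataItem", "Button", "TabItem", "MenuItem", "Edit", "ListItem",
--     "ScrollBar", "ComboBox", "Hyperlink", "CheckBox", "TreeItem",
--     "Document", "RadioButton", "Spinner", "Image", "Text", "Slider",
-- )
--
-- CONTROL_TYPE_TO_IDX = {t: i for i, t in enumerate(CONTROL_TYPES)}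
--
-- COUNT_BUCKETS = (0, 5, 15, 50, 150, 500)
--
--
-- def _bucket(count):
--     """Bucket index = number of thresholds strictly below count."""
--     return sum(1 for t in COUNT_BUCKETS if t < count)
--
--
-- def _build_control_fingerprint(type_counts):
--     """Single classifying pass over type_counts instead of two separate scans."""
--     parts = []
--     other = 0
--     for t, cnt in type_counts.items():
--         if t in CONTROL_TYPE_TO_IDX:
--             b = _bucket(cnt)
--             if b > 0:
--                 parts.append(f"{t}:{b}")
--         else:
--             other += cnt
--     if other > 0:
--         parts.append(f"Other:{_bucket(other)}")
--     return ",".join(sorted(parts))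
-- ===== Notes on version B (the rewrite author's own statement) =====
-- stated objective: simpler
-- what changed: B replaces A's two separate scans (a loop over the 17-entry CONTROL_TYPES constant doing a dict lookup each, plus a comprehension over items() for Other) by a single classifying pass over type_counts.items(), and computes the bucket as the count of thresholds strictly below the value instead of A's early-return threshold loop.
import Mathlib
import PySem

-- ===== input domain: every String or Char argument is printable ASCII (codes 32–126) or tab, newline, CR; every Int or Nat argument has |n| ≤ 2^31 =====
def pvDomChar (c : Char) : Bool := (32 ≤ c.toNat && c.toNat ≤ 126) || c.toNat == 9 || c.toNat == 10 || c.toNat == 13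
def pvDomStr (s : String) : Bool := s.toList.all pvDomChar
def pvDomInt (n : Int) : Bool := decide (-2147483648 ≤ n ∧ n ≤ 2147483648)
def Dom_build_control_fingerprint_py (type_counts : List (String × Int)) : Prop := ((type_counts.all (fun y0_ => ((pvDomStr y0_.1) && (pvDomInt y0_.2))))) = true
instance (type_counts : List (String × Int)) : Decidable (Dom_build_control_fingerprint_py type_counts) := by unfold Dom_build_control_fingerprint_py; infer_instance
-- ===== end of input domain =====

-- B merges A's two scans (constant-list loop + Other comprehension) into one classifying
-- pass over type_counts and computes the bucket by counting thresholds below the value.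

-- ===== PORT A =====
def CONTROL_TYPES : List String :=
  ["DataItem", "Button", "TabItem", "MenuItem", "Edit", "ListItem",
   "ScrollBar", "ComboBox", "Hyperlink", "CheckBox", "TreeItem",
   "Document", "RadioButton", "Spinner", "Image", "Text", "Slider"]

def CONTROL_TYPE_TO_IDX : PySem.Dict String Int :=
  (PySem.List.enumerate CONTROL_TYPES).foldl (fun d p => d.insert p.2 p.1) PySem.Dict.empty

def COUNT_BUCKETS : List Int := [0, 5, 15, 50, 150, 500]

-- A's early-return loop in _bucket_count, ported as structural recursion over enumerate
def bucketLoop (count : Int) : List (Int × Int) → Int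
  | [] => PySem.List.len COUNT_BUCKETS
  | p :: rest => if count ≤ p.2 then p.1 else bucketLoop count rest

def bucket_count_py (count : Int) : Int :=
  bucketLoop count (PySem.List.enumerate COUNT_BUCKETS)

def build_control_fingerprint_py (type_counts : List (String × Int)) : String :=
  let d := PySem.Dict.mk type_counts
  let parts : List String := CONTROL_TYPES.foldl (fun parts ctype =>
    let cnt := d.getD ctype 0
    let bucket := bucket_count_py cnt
    if bucket > 0 then parts ++ [ctype ++ ":" ++ PySem.Int.toStr bucket] else parts) []
  let other_count : Int :=
    ((type_counts.filter (fun p => ! CONTROL_TYPE_TO_IDX.contains p.1)).map Prod.snd).sum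
  let parts := if other_count > 0 then
      parts ++ ["Other:" ++ PySem.Int.toStr (bucket_count_py other_count)] else parts
  PySem.Str.join "," (PySem.List.sorted parts (fun x => x) false)

-- ===== PORT B =====
-- B's bucket: sum(1 for t in COUNT_BUCKETS if t < count)
def bucket_alt (count : Int) : Int :=
  ((COUNT_BUCKETS.filter (fun t => t < count)).map (fun _ => (1 : Int))).sum

def build_control_fingerprint_py_alt (type_counts : List (String × Int)) : String :=
  let st : List String × Int := type_counts.foldl (fun st p =>
    if CONTROL_TYPE_TO_IDX.contains p.1 then
      let b := bucket_alt p.2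
      (if b > 0 then st.1 ++ [p.1 ++ ":" ++ PySem.Int.toStr b] else st.1, st.2)
    else (st.1, st.2 + p.2)) ([], 0)
  let parts := if st.2 > 0 then st.1 ++ ["Other:" ++ PySem.Int.toStr (bucket_alt st.2)] else st.1
  PySem.Str.join "," (PySem.List.sorted parts (fun x => x) false)

-- ===== PRECONDITION & SPEC =====
-- Pre_ excludes association lists with duplicate keys: they represent no Python dict
-- (a dict has unique keys), and only on such non-dict lists can A's first-match
-- lookup and B's full items() pass disagree.
def Pre_build_control_fingerprint_py (type_counts : List (String × Int)) : Prop :=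
  (type_counts.map Prod.fst).Nodup
instance (type_counts : List (String × Int)) : Decidable (Pre_build_control_fingerprint_py type_counts) := by unfold Pre_build_control_fingerprint_py; infer_instance

def pvWitness_build_control_fingerprint_py : (List (String × Int)) :=
  [("Button", 3), ("Foo", 7), ("DataItem", 600)]

def Spec_build_control_fingerprint_py (type_counts : List (String × Int)) (out : String) : Prop := out = build_control_fingerprint_py_alt type_counts
instance (type_counts : List (String × Int)) (out : String) : Decidable (Spec_build_control_fingerprint_py type_counts out) := by unfold Spec_build_control_fingerprint_py; infer_instance

-- ===== CLAIM (what is proved, stated in full; the proofs are below) =====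
def Claim_equal_build_control_fingerprint_py : Prop := ∀ (type_counts : List (String × Int)), Dom_build_control_fingerprint_py type_counts → Pre_build_control_fingerprint_py type_counts → Spec_build_control_fingerprint_py type_counts (build_control_fingerprint_py type_counts)

-- ===== LEMMAS AND PROOFS =====

theorem bucket_eq (c : Int) : bucket_count_py c = bucket_alt c := by
  by_cases h0 : c ≤ 0
  · simp [bucket_count_py, bucket_alt, COUNT_BUCKETS, PySem.List.enumerate, bucketLoop, List.filter_cons, PySem.List.len_eq, show ¬((0:Int) < c) by omega, show c ≤ 0 by omega, show ¬((5:Int) < c) by omega, show ¬((15:Int) < c) by omega, show ¬((50:Int) < c) by omega, show ¬((150:Int) < c) by omega, show ¬((500:Int) < c) by omega]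
  by_cases h1 : c ≤ 5
  · simp [bucket_count_py, bucket_alt, COUNT_BUCKETS, PySem.List.enumerate, bucketLoop, List.filter_cons, PySem.List.len_eq, show (0:Int) < c by omega, show ¬(c ≤ 0) by omega, show ¬((5:Int) < c) by omega, show c ≤ 5 by omega, show ¬((15:Int) < c) by omega, show ¬((50:Int) < c) by omega, show ¬((150:Int) < c) by omega, show ¬((500:Int) < c) by omega]
  by_cases h2 : c ≤ 15
  · simp [bucket_count_py, bucket_alt, COUNT_BUCKETS, PySem.List.enumerate, bucketLoop, List.filter_cons, PySem.List.len_eq, show (0:Int) < c by omega, show ¬(c ≤ 0) by omega, show (5:Int) < c by omega, show ¬(c ≤ 5) by omega, show ¬((15:Int) < c) by omega, show c ≤ 15 by omega, show ¬((50:Int) < c) by omega, show ¬((150:Int) < c) by omega, show ¬((500:Int) < c) by omega]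
  by_cases h3 : c ≤ 50
  · simp [bucket_count_py, bucket_alt, COUNT_BUCKETS, PySem.List.enumerate, bucketLoop, List.filter_cons, PySem.List.len_eq, show (0:Int) < c by omega, show ¬(c ≤ 0) by omega, show (5:Int) < c by omega, show ¬(c ≤ 5) by omega, show (15:Int) < c by omega, show ¬(c ≤ 15) by omega, show ¬((50:Int) < c) by omega, show c ≤ 50 by omega, show ¬((150:Int) < c) by omega, show ¬((500:Int) < c) by omega]
  by_cases h4 : c ≤ 150
  · simp [bucket_count_py, bucket_alt, COUNT_BUCKETS, PySem.List.enumerate, bucketLoop, List.filter_cons, PySem.List.len_eq, show (0:Int) < c by omega, show ¬(c ≤ 0) by omega, show (5:Int) < c by omega, show ¬(c ≤ 5) by omega, show (15:Int) < c by omega, show ¬(c ≤ 15) by omega, show (50:Int) < c by omega, show ¬(c ≤ 50) by omega, show ¬((150:Int) < c) by omega, show c ≤ 150 by omega, show ¬((500:Int) < c) by omega]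
  by_cases h5 : c ≤ 500
  · simp [bucket_count_py, bucket_alt, COUNT_BUCKETS, PySem.List.enumerate, bucketLoop, List.filter_cons, PySem.List.len_eq, show (0:Int) < c by omega, show ¬(c ≤ 0) by omega, show (5:Int) < c by omega, show ¬(c ≤ 5) by omega, show (15:Int) < c by omega, show ¬(c ≤ 15) by omega, show (50:Int) < c by omega, show ¬(c ≤ 50) by omega, show (150:Int) < c by omega, show ¬(c ≤ 150) by omega, show ¬((500:Int) < c) by omega, show c ≤ 500 by omega]
  · simp [bucket_count_py, bucket_alt, COUNT_BUCKETS, PySem.List.enumerate, bucketLoop, List.filter_cons, PySem.List.len_eq, show (0:Int) < c by omega, show ¬(c ≤ 0) by omega, show (5:Int) < c by omega, show ¬(c ≤ 5) by omega, show (15:Int) < c by omega, show ¬(c ≤ 15) by omega, show (50:Int) < c by omega, show ¬(c ≤ 50) by omega, show (150:Int) < c by omega, show ¬(c ≤ 150) by omega, show (500:Int) < c by omega, show ¬(c ≤ 500) by omega]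

theorem bucket_zero : bucket_alt 0 = 0 := by decide

def pvF (t : String) (b : Int) : String := t ++ ":" ++ PySem.Int.toStr b

def pvLkp (tc : List (String × Int)) (t : String) : Int := (PySem.Dict.mk tc).getD t 0

def pvSel (l : String → Int) (CT : List String) : List String :=
  (CT.filter (fun s => bucket_alt (l s) > 0)).map (fun s => pvF s (bucket_alt (l s)))

def pvOpt (t : String) (v : Int) (b : Bool) : List String :=
  if b && bucket_alt v > 0 then [pvF t (bucket_alt v)] else []

theorem lkp_nil (t : String) : pvLkp [] t = 0 := by
  simp [pvLkp, PySem.Dict.getD, PySem.Dict.get?]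

theorem lkp_cons (t s : String) (v : Int) (rest : List (String × Int)) :
    pvLkp ((t, v) :: rest) s = if t == s then v else pvLkp rest s := by
  simp only [pvLkp, PySem.Dict.getD_eq_get?_getD, PySem.Dict.get?_mk_cons]
  split <;> rfl

theorem lkp_not_mem (rest : List (String × Int)) (t : String)
    (h : t ∉ rest.map Prod.fst) : pvLkp rest t = 0 := by
  induction rest with
  | nil => exact lkp_nil t
  | cons p r ih =>
    simp only [List.map_cons, List.mem_cons, not_or] at h
    rw [show p = (p.1, p.2) from rfl, lkp_cons]
    have : (p.1 == t) = false := by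
      simp only [beq_eq_false_iff_ne, ne_eq]
      exact fun hh => h.1 hh.symm
    rw [this]
    simpa using ih h.2

theorem pvSel_cons_expand (l : String → Int) (a : String) (ct : List String) :
    pvSel l (a :: ct)
      = (if bucket_alt (l a) > 0 then [pvF a (bucket_alt (l a))] else []) ++ pvSel l ct := by
  simp only [pvSel, List.filter_cons]
  split <;> simp_all

theorem pvSel_congr (l₁ l₂ : String → Int) (CT : List String)
    (h : ∀ s ∈ CT, l₁ s = l₂ s) : pvSel l₁ CT = pvSel l₂ CT := by
  induction CT with
  | nil => rfl
  | cons a ct ih =>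
    rw [pvSel_cons_expand, pvSel_cons_expand, h a (List.mem_cons_self ..),
      ih (fun s hs => h s (List.mem_cons_of_mem _ hs))]

theorem pvSel_cons_lookup (CT : List String) (hCT : CT.Nodup) (t : String) (v : Int)
    (l : String → Int) (hl : l t = 0) :
    (pvSel (fun s => if t == s then v else l s) CT).Perm
      (pvOpt t v (CT.contains t) ++ pvSel l CT) := by
  induction CT with
  | nil => simp [pvSel, pvOpt]
  | cons a ct ih =>
    rw [List.nodup_cons] at hCT
    rw [pvSel_cons_expand, pvSel_cons_expand]
    by_cases hat : t = a
    · subst hat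
      rw [show (if t == t then v else l t) = v by simp]
      have hcongr : pvSel (fun s => if t == s then v else l s) ct = pvSel l ct :=
        pvSel_congr _ _ ct (fun s hs => by
          have : (t == s) = false := by
            simp only [beq_eq_false_iff_ne, ne_eq]
            exact fun hh => hCT.1 (hh ▸ hs)
          rw [this]; rfl)
      rw [hcongr, hl, bucket_zero]
      simp [pvOpt]
    · have hne : (t == a) = false := by simp [hat]
      rw [show (if t == a then v else l a) = l a by rw [hne]; rfl]
      have hne' : (a == t) = false := by
        simp only [beq_eq_false_iff_ne, ne_eq]
        exact fun hh => hat hh.symm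
      have hcc : (a :: ct).contains t = ct.contains t := by
        simp [List.contains_cons, hne, hne']
        exact fun hh => absurd hh hat
      rw [hcc]
      refine ((ih hCT.2).append_left _).trans ?_
      rw [← List.append_assoc]
      refine (List.perm_append_comm.append_right _).trans ?_
      rw [List.append_assoc]


def pvPartsB (tc : List (String × Int)) : List String :=
  (tc.filter (fun p => CONTROL_TYPE_TO_IDX.contains p.1 && decide (bucket_alt p.2 > 0))).map
    (fun p => pvF p.1 (bucket_alt p.2))

def pvOther (tc : List (String × Int)) : Int :=
  ((tc.filter (fun p => ! CONTROL_TYPE_TO_IDX.contains p.1)).map Prod.snd).sum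

theorem contains_idx_iff (s : String) :
    CONTROL_TYPE_TO_IDX.contains s = true ↔ s ∈ CONTROL_TYPES := by
  simp [CONTROL_TYPE_TO_IDX, CONTROL_TYPES, PySem.List.enumerate, PySem.Dict.contains_insert,
    PySem.Dict.contains_empty, List.mem_cons]
  tauto

theorem contains_idx_eq (s : String) :
    CONTROL_TYPE_TO_IDX.contains s = CONTROL_TYPES.contains s := by
  by_cases hm : s ∈ CONTROL_TYPES
  · simp [contains_idx_iff, hm]
  · have h1 : CONTROL_TYPE_TO_IDX.contains s = false := by
      rw [Bool.eq_false_iff]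
      exact fun hh => hm ((contains_idx_iff s).1 hh)
    have h2 : CONTROL_TYPES.contains s = false := by simpa using hm
    rw [h1, h2]

theorem pvSel_zero (CT : List String) : pvSel (fun _ => 0) CT = [] := by
  induction CT with
  | nil => rfl
  | cons a ct ih => rw [pvSel_cons_expand]; simp [bucket_zero, ih]

theorem pvPartsB_cons (t : String) (v : Int) (r : List (String × Int)) :
    pvPartsB ((t, v) :: r)
      = pvOpt t v (CONTROL_TYPE_TO_IDX.contains t) ++ pvPartsB r := by
  simp only [pvPartsB, pvOpt, List.filter_cons]
  split <;> simp_all [pvPartsB]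

theorem pvOther_cons (t : String) (v : Int) (r : List (String × Int)) :
    pvOther ((t, v) :: r) = (if CONTROL_TYPE_TO_IDX.contains t then 0 else v) + pvOther r := by
  simp only [pvOther, List.filter_cons]
  split <;> simp_all [pvOther] <;> split <;> simp_all

theorem partsA_perm (tc : List (String × Int)) (h : (tc.map Prod.fst).Nodup) :
    (pvSel (pvLkp tc) CONTROL_TYPES).Perm (pvPartsB tc) := by
  induction tc with
  | nil =>
    rw [pvSel_congr (pvLkp []) (fun _ => 0) CONTROL_TYPES (fun s _ => lkp_nil s), pvSel_zero]
    exact List.Perm.refl _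
  | cons p rest ih =>
    obtain ⟨t, v⟩ := p
    simp only [List.map_cons, List.nodup_cons] at h
    rw [pvSel_congr _ _ CONTROL_TYPES (fun s _ => lkp_cons t s v rest)]
    refine (pvSel_cons_lookup CONTROL_TYPES (by decide) t v _ (lkp_not_mem rest t h.1)).trans ?_
    rw [pvPartsB_cons, ← contains_idx_eq]
    exact (ih h.2).append_left _

-- characterization of A's parts loop (via PySem.List.foldl_append_if)
theorem foldA_char (tc : List (String × Int)) (acc : List String) :
    CONTROL_TYPES.foldl (fun parts ctype =>
      if bucket_alt ((PySem.Dict.mk tc).getD ctype 0) > 0 then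
        parts ++ [ctype ++ ":" ++ PySem.Int.toStr (bucket_alt ((PySem.Dict.mk tc).getD ctype 0))]
      else parts) acc
    = acc ++ pvSel (pvLkp tc) CONTROL_TYPES := by
  have h := PySem.List.foldl_append_if
    (fun ctype => decide (bucket_alt (pvLkp tc ctype) > 0))
    (fun ctype => pvF ctype (bucket_alt (pvLkp tc ctype))) CONTROL_TYPES acc
  simpa [pvSel, pvF, pvLkp] using h

-- characterization of B's single classifying pass
theorem foldB_char (tc : List (String × Int)) (ps : List String) (o : Int) :
    tc.foldl (fun (st : List String × Int) p =>
      if CONTROL_TYPE_TO_IDX.contains p.1 then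
        (if bucket_alt p.2 > 0 then st.1 ++ [p.1 ++ ":" ++ PySem.Int.toStr (bucket_alt p.2)] else st.1, st.2)
      else (st.1, st.2 + p.2)) (ps, o)
    = (ps ++ pvPartsB tc, o + pvOther tc) := by
  induction tc generalizing ps o with
  | nil => simp [pvPartsB, pvOther]
  | cons p rest ih =>
    obtain ⟨t, v⟩ := p
    rw [List.foldl_cons, pvPartsB_cons, pvOther_cons]
    by_cases hc : CONTROL_TYPE_TO_IDX.contains t
    · simp only [hc, if_pos, pvOpt, Bool.true_and]
      by_cases hb : bucket_alt v > 0
      · simp only [hb, if_pos, decide_true, ih, List.append_assoc, pvF]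
        simp
      · simp only [hb, if_neg, decide_false]
        simp [ih]
    · simp only [Bool.not_eq_true] at hc
      simp only [hc, Bool.false_eq_true, if_neg, pvOpt, Bool.false_and, if_false,
        List.nil_append, ih]
      simp
      omega

-- ===== VERDICT (by name: the statement is the Claim_ definition above) =====
theorem build_control_fingerprint_py_spec : Claim_equal_build_control_fingerprint_py := by
  intro tc _hdom hpre
  unfold Spec_build_control_fingerprint_py
  simp only [build_control_fingerprint_py, build_control_fingerprint_py_alt, bucket_eq]
  rw [foldB_char tc [] 0, foldA_char tc []]
  simp only [List.nil_append, zero_add]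
  have hsum : ((tc.filter (fun p => ! CONTROL_TYPE_TO_IDX.contains p.1)).map Prod.snd).sum
      = pvOther tc := rfl
  rw [hsum]
  apply congrArg
  apply PySem.List.sorted_eq_sorted_of_perm _ _ _ (fun a b h => h)
  by_cases ho : pvOther tc > 0
  · simp only [ho, if_pos]
    exact (partsA_perm tc hpre).append_right _
  · simp only [ho, if_neg, not_false_eq_true]
    exact partsA_perm tc hpre
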